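-- pv_equiv track=rewrite | github.com/fairickoo/Lab2D_DataStructures | 06_Sort/Q3.py | sumEven
-- ===== SOURCE A (Python) =====
-- def sumEven(l, n):
-- 	if n >= 0:
-- 		if l[n] % 2 == 0:
-- 			return l[n] + sumEven(l, n-1)
-- 		else:
-- 			return sumEven(l, n-1)
-- 	else:
-- 		return 0
-- ===== SOURCE B (Python) =====
-- def sumEven(l, n):
--     total = 0
--     for i in range(n + 1):
--         if l[i] % 2 == 0:
--             total += l[i]
--     return total
-- ===== Notes on version B (the rewrite author's own statement) =====
-- stated objective: simpler
-- what changed: Replaces the downward recursion with a single iterative forward loop accumulating the even elements over indices 0..n.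
-- outside the precondition, e.g. on sumEven([1, 2], 5): A raises IndexError, B raises IndexError
import Mathlib
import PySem

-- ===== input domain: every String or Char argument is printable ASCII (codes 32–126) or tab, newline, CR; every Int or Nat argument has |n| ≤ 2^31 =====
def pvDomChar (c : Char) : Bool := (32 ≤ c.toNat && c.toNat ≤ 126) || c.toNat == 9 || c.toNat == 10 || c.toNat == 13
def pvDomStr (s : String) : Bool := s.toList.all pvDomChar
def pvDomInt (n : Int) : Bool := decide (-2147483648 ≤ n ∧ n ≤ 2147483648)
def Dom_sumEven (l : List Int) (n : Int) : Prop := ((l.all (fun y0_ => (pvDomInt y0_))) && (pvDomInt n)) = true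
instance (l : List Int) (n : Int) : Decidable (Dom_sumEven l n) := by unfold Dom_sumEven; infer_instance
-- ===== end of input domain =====

-- B replaces A's downward recursion with a single forward loop accumulating even elements (simpler; return-value equivalence).
-- ===== PORT A =====
def sumEven (l : List Int) (n : Int) : Int :=
  if _h : n ≥ 0 then
    match PySem.List.pyGet? l n with
    | some v => if PySem.Int.mod v 2 == 0 then v + sumEven l (n - 1) else sumEven l (n - 1)
    | none => 0   -- Python raises IndexError here; excluded by Pre_sumEven
  else 0
termination_by (n + 1).toNat
decreasing_by all_goals (simp_wf; omega)

-- ===== PORT B =====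
def sumEven_alt (l : List Int) (n : Int) : Int :=
  (PySem.List.pyRange 0 (n + 1) 1).foldl
    (fun total i =>
      match PySem.List.pyGet? l i with
      | some v => if PySem.Int.mod v 2 == 0 then total + v else total
      | none => total)   -- Python raises IndexError here; excluded by Pre_sumEven
    0

-- ===== PRECONDITION & SPEC =====
-- Pre_ excludes exactly the inputs where Python A raises IndexError (n ≥ len(l)).
def Pre_sumEven (l : List Int) (n : Int) : Prop := n < l.length
instance (l : List Int) (n : Int) : Decidable (Pre_sumEven l n) := by unfold Pre_sumEven; infer_instance
def pvWitness_sumEven : List Int × Int := ([2, 3, 4], 2)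
def Spec_sumEven (l : List Int) (n : Int) (out : Int) : Prop := out = sumEven_alt l n
instance (l : List Int) (n : Int) (out : Int) : Decidable (Spec_sumEven l n out) := by unfold Spec_sumEven; infer_instance

-- ===== CLAIM (what is proved, stated in full; the proofs are below) =====
def Claim_equal_sumEven : Prop := ∀ (l : List Int) (n : Int), Dom_sumEven l n → Pre_sumEven l n → Spec_sumEven l n (sumEven l n)

-- ===== LEMMAS AND PROOFS =====

-- ===== VERDICT (by name: the statement is the Claim_ definition above) =====
-- the fold's body only ever adds to the accumulator, so it factors out
theorem sumEven_foldl_acc (l : List Int) (r : List Int) (a : Int) :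
    r.foldl (fun total i =>
      match PySem.List.pyGet? l i with
      | some v => if PySem.Int.mod v 2 == 0 then total + v else total
      | none => total) a
    = a + r.foldl (fun total i =>
      match PySem.List.pyGet? l i with
      | some v => if PySem.Int.mod v 2 == 0 then total + v else total
      | none => total) 0 := by
  induction r generalizing a with
  | nil => simp
  | cons x xs ih =>
    simp only [List.foldl_cons]
    cases hx : PySem.List.pyGet? l x with
    | none => exact ih a
    | some v =>
      dsimp only
      split_ifs with he
      · rw [ih (a + v), ih (0 + v)]; omega
      · exact ih a

theorem sumEven_eq_foldl (l : List Int) (m : Nat) (hm : (m : Int) ≤ l.length) :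
    sumEven l ((m : Int) - 1) = sumEven_alt l ((m : Int) - 1) := by
  induction m with
  | zero =>
    unfold sumEven sumEven_alt
    rw [PySem.List.pyRange_one_eq_nil (by omega)]
    simp
  | succ k ih =>
    unfold sumEven_alt
    have h1 : ((k + 1 : Nat) : Int) - 1 + 1 = ((k : Int) + 1) := by push_cast; ring
    rw [h1, PySem.List.pyRange_one_succ_right (by omega), List.foldl_append]
    simp only [List.foldl_cons, List.foldl_nil]
    rw [sumEven_foldl_acc]
    have hk : k < l.length := by omega
    have hg : PySem.List.pyGet? l (k : Int) = some l[k] := PySem.List.pyGet?_ofNat l k hk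
    have h2 : ((k + 1 : Nat) : Int) - 1 = (k : Int) := by push_cast; ring
    rw [h2]
    unfold sumEven
    rw [dif_pos (by omega), hg]
    dsimp only
    have ihk := ih (by omega)
    unfold sumEven_alt at ihk
    rw [show ((k : Int) - 1 + 1) = (k : Int) by ring] at ihk
    rw [ihk]
    split_ifs with he <;> omega

theorem sumEven_spec : Claim_equal_sumEven := by
  intro l n _hd hpre
  unfold Spec_sumEven
  by_cases hn : 0 ≤ n
  · have := sumEven_eq_foldl l (n + 1).toNat (by unfold Pre_sumEven at hpre; omega)
    rwa [show (((n + 1).toNat : Int) - 1) = n by omega] at this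
  · unfold sumEven sumEven_alt
    rw [dif_neg (by omega), PySem.List.pyRange_one_eq_nil (by omega)]
    simp
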